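-- pv_equiv track=rewrite | github.com/matthieu-prigent-92/pendu-python | fonctions.py | recup_mot_masque
-- ===== SOURCE A (Python) =====
-- def recup_mot_masque(mot_complet, lettres_trouvees):
--     """Fonction qui renvoie le mot à trouver masqué de "*" selon les lettres trouvées
--     Cette fonction prend en argument
--         - une chaîne de caractères "mot_complet"
--         - une liste "lettres_trouvees"
--     La valeur retournée est une chaîne de caractères"""
--     mot = ""
--     for lettre in mot_complet:
--         if lettre in lettres_trouvees:
--             mot += lettre
--         else:
--             mot += "*"
--     return mot
-- ===== SOURCE B (Python) =====
-- def recup_mot_masque(mot_complet, lettres_trouvees):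
--     result = list('*' * len(mot_complet))
--     for lettre in lettres_trouvees:
--         for i, c in enumerate(mot_complet):
--             if c == lettre:
--                 result[i] = c
--     return ''.join(result)
-- ===== Notes on version B (the rewrite author's own statement) =====
-- stated objective: alternative
-- what changed: B starts from a fully masked buffer and reveals all positions of each found letter (loop over guesses, inner scan of the word), instead of A's single pass over the word with a membership test per character.
import Mathlib
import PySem

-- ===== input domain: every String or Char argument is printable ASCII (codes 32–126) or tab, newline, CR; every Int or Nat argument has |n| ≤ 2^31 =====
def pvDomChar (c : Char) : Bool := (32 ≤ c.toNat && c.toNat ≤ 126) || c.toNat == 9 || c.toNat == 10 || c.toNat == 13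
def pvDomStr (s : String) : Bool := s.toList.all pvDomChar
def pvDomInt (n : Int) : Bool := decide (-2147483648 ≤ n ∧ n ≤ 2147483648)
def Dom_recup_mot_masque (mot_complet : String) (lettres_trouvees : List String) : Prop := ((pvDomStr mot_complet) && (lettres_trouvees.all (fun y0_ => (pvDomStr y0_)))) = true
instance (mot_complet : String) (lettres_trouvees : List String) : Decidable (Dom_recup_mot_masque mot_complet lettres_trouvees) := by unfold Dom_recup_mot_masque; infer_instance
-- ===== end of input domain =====

-- B reveals guessed letters into an initially fully masked buffer (loop over guesses, scan of the
-- word per guess) instead of A's single pass over the word with a membership test per character.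

-- ===== PORT A =====
-- A: mot = ""; for lettre in mot_complet: mot += lettre if lettre in lettres_trouvees else "*"
def recup_mot_masque (mot_complet : String) (lettres_trouvees : List String) : String :=
  String.ofList
    (mot_complet.toList.foldl
      (fun mot lettre =>
        if lettres_trouvees.contains (String.ofList [lettre]) then mot ++ [lettre] else mot ++ ['*'])
      [])

-- ===== PORT B =====
-- B: result = list('*' * len(mot)); for lettre in found: for i,c in enumerate(mot): if c == lettre: result[i] = c
def recup_mot_masque_alt (mot_complet : String) (lettres_trouvees : List String) : String :=
  String.ofList
    (lettres_trouvees.foldl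
      (fun result lettre =>
        List.zipWith (fun c b => if String.ofList [c] == lettre then c else b) mot_complet.toList result)
      (mot_complet.toList.map (fun _ => '*')))

-- ===== PRECONDITION & SPEC =====
def Spec_recup_mot_masque (mot_complet : String) (lettres_trouvees : List String) (out : String) : Prop := out = recup_mot_masque_alt mot_complet lettres_trouvees
instance (mot_complet : String) (lettres_trouvees : List String) (out : String) : Decidable (Spec_recup_mot_masque mot_complet lettres_trouvees out) := by unfold Spec_recup_mot_masque; infer_instance

-- ===== CLAIM (what is proved, stated in full; the proofs are below) =====
def Claim_equal_recup_mot_masque : Prop := ∀ (mot_complet : String) (lettres_trouvees : List String), Dom_recup_mot_masque mot_complet lettres_trouvees → Spec_recup_mot_masque mot_complet lettres_trouvees (recup_mot_masque mot_complet lettres_trouvees)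

-- ===== LEMMAS AND PROOFS =====

-- A's loop builds the per-character map.
theorem foldlA_eq_map (lt : List String) (l : List Char) (acc : List Char) :
    l.foldl (fun mot lettre =>
        if lt.contains (String.ofList [lettre]) then mot ++ [lettre] else mot ++ ['*']) acc
      = acc ++ l.map (fun c => if lt.contains (String.ofList [c]) then c else '*') := by
  induction l generalizing acc with
  | nil => simp
  | cons c l ih =>
    simp only [List.foldl_cons, List.map_cons, List.contains_eq_mem, decide_eq_true_eq] at *
    by_cases h : String.ofList [c] ∈ lt <;> simp [h, ih]

theorem zipWith_map_self (f : Char → Char → Char) (h : Char → Char) (l : List Char) :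
    List.zipWith (fun c b => f c b) l (l.map h) = l.map (fun c => f c (h c)) := by
  induction l with
  | nil => rfl
  | cons c l ih => simp [ih]

-- B's loop, started from any mask map h, reveals exactly the letters of ls.
theorem foldlB_eq_map (word : List Char) (ls : List String) (h : Char → Char) :
    ls.foldl
      (fun result lettre =>
        List.zipWith (fun c b => if String.ofList [c] == lettre then c else b) word result)
      (word.map h)
      = word.map (fun c => if ls.contains (String.ofList [c]) then c else h c) := by
  induction ls generalizing h with
  | nil => simp
  | cons l ls ih =>
    simp only [List.foldl_cons]
    rw [zipWith_map_self (fun c b => if String.ofList [c] == l then c else b) h word, ih]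
    apply List.map_congr_left
    intro c _
    simp only [List.contains_eq_mem, List.mem_cons, beq_iff_eq, decide_eq_true_eq]
    by_cases h1 : String.ofList [c] = l <;>
      by_cases h2 : String.ofList [c] ∈ ls <;>
      simp [h1, h2]

-- ===== VERDICT (by name: the statement is the Claim_ definition above) =====
theorem recup_mot_masque_spec : Claim_equal_recup_mot_masque := by
  intro mot lt _
  show _ = _
  unfold recup_mot_masque recup_mot_masque_alt
  rw [foldlA_eq_map, foldlB_eq_map]
  simp [List.contains_eq_mem]
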